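-- pv_equiv track=rewrite | github.com/AxelSchneewind/cpa | test_progs/sum_cubes_safe.py | sum_cubes
-- ===== SOURCE A (Python) =====
-- def inc(x):
--     return x + 1
--
-- def add(x, y):
--     return x + y
--
-- def sum_cubes(n):
--     s = 0
--     i = 0
--     while i < n:
--         j = 0
--         while j < n:
--             k = 0
--             while k < n:
--                 s += add(i, add(j, k))
--                 k = inc(k)
--             j = inc(j)
--         i = inc(i)
--     return s
-- ===== SOURCE B (Python) =====
-- def sum_cubes(n):
--     m = n if n > 0 else 0
--     return 3 * m * m * m * (m - 1) // 2
-- ===== Notes on version B (the rewrite author's own statement) =====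
-- stated objective: faster
-- what changed: Replaced the triple nested loop summing i+j+k by the closed-form arithmetic expression 3*m^3*(m-1)//2 (m = max(n,0)).
import Mathlib
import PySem

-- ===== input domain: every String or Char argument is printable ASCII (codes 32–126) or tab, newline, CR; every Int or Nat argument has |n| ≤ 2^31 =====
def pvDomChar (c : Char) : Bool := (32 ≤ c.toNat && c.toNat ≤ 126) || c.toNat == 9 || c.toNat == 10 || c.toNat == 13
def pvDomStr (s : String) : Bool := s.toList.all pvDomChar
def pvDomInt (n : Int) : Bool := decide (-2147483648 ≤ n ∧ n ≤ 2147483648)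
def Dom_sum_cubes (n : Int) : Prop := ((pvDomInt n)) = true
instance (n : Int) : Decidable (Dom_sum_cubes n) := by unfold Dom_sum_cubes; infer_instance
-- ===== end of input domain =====

-- B replaces A's triple nested loop by a closed-form O(1) arithmetic expression.

-- ===== PORT A =====
def pvInc (x : Int) : Int := x + 1

def pvAdd (x y : Int) : Int := x + y

-- innermost while loop over k
def pvLoopK (n i j : Int) (s k : Int) : Int :=
  if _h : k < n then pvLoopK n i j (s + pvAdd i (pvAdd j k)) (pvInc k) else s
termination_by (n - k).toNat
decreasing_by simp [pvInc]; omega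

-- middle while loop over j
def pvLoopJ (n i : Int) (s j : Int) : Int :=
  if _h : j < n then pvLoopJ n i (pvLoopK n i j s 0) (pvInc j) else s
termination_by (n - j).toNat
decreasing_by simp [pvInc]; omega

-- outer while loop over i
def pvLoopI (n : Int) (s i : Int) : Int :=
  if _h : i < n then pvLoopI n (pvLoopJ n i s 0) (pvInc i) else s
termination_by (n - i).toNat
decreasing_by simp [pvInc]; omega

def sum_cubes (n : Int) : Int := pvLoopI n 0 0

-- ===== PORT B =====
def sum_cubes_alt (n : Int) : Int :=
  let m : Int := if n > 0 then n else 0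
  PySem.Int.floordiv (3 * m * m * m * (m - 1)) 2

-- ===== PRECONDITION & SPEC =====
def Spec_sum_cubes (n : Int) (out : Int) : Prop := out = sum_cubes_alt n
instance (n : Int) (out : Int) : Decidable (Spec_sum_cubes n out) := by unfold Spec_sum_cubes; infer_instance

-- ===== CLAIM (what is proved, stated in full; the proofs are below) =====
def Claim_equal_sum_cubes : Prop := ∀ (n : Int), Dom_sum_cubes n → Spec_sum_cubes n (sum_cubes n)

-- ===== LEMMAS AND PROOFS =====

-- G d = 0 + 1 + … + (d-1)
def pvG (d : Nat) : Nat := d * (d - 1) / 2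

theorem pvG_succ (d : Nat) : pvG (d + 1) = pvG d + d := by
  unfold pvG
  have h : (d + 1) * (d + 1 - 1) = d * (d - 1) + d * 2 := by
    cases d with
    | zero => rfl
    | succ k => simp; ring
  rw [h, Nat.add_mul_div_right _ _ (by norm_num)]

theorem pvLoopK_eq (n i j : Int) (d : Nat) :
    ∀ (s k : Int), k + d = n →
      pvLoopK n i j s k = s + d * (i + j + k) + (pvG d : Int) := by
  induction d with
  | zero => intro s k hk; unfold pvLoopK; rw [dif_neg (by omega)]; simp [pvG]
  | succ d ih =>
    intro s k hk
    unfold pvLoopK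
    rw [dif_pos (by omega)]
    rw [ih _ _ (by simp only [pvInc]; omega)]
    have hg : ((pvG (d + 1) : Nat) : Int) = (pvG d : Int) + d := by
      exact_mod_cast pvG_succ d
    simp only [pvInc, pvAdd, hg]
    push_cast
    ring

theorem pvLoopJ_eq (n i : Int) (N : Nat) (hn : (N : Int) = n) (d : Nat) :
    ∀ (s j : Int), j + d = n →
      pvLoopJ n i s j = s + d * (N * (i + j) + (pvG N : Int)) + N * (pvG d : Int) := by
  induction d with
  | zero => intro s j hj; unfold pvLoopJ; rw [dif_neg (by omega)]; simp [pvG]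
  | succ d ih =>
    intro s j hj
    unfold pvLoopJ
    rw [dif_pos (by omega)]
    rw [pvLoopK_eq n i j N s 0 (by omega)]
    rw [ih _ _ (by simp only [pvInc]; omega)]
    have hg : ((pvG (d + 1) : Nat) : Int) = (pvG d : Int) + d := by
      exact_mod_cast pvG_succ d
    simp only [pvInc, hg]
    push_cast
    ring

theorem pvLoopI_eq (n : Int) (N : Nat) (hn : (N : Int) = n) (d : Nat) :
    ∀ (s i : Int), i + d = n →
      pvLoopI n s i = s + d * ((N : Int) * (N * i + (pvG N : Int)) + N * (pvG N : Int))
        + N * N * (pvG d : Int) := by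
  induction d with
  | zero => intro s i hi; unfold pvLoopI; rw [dif_neg (by omega)]; simp [pvG]
  | succ d ih =>
    intro s i hi
    unfold pvLoopI
    rw [dif_pos (by omega)]
    rw [pvLoopJ_eq n i N hn N s 0 (by omega)]
    rw [ih _ _ (by simp only [pvInc]; omega)]
    have hg : ((pvG (d + 1) : Nat) : Int) = (pvG d : Int) + d := by
      exact_mod_cast pvG_succ d
    simp only [pvInc, hg]
    push_cast
    ring

theorem pvTwo_pvG (N : Nat) : 2 * pvG N = N * (N - 1) := by
  unfold pvG
  cases N with
  | zero => rfl
  | succ k =>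
    simp only [Nat.succ_sub_one]
    exact Nat.mul_div_cancel' (by rw [Nat.mul_comm]; exact (Nat.even_mul_succ_self k).two_dvd)

-- ===== VERDICT (by name: the statement is the Claim_ definition above) =====
theorem sum_cubes_spec : Claim_equal_sum_cubes := by
  intro n _
  unfold Spec_sum_cubes sum_cubes sum_cubes_alt
  by_cases hpos : 0 < n
  · have hN : ((n.toNat : Int)) = n := Int.toNat_of_nonneg (by omega)
    rw [pvLoopI_eq n n.toNat hN n.toNat 0 0 (by omega)]
    rw [if_pos hpos]
    have hN1 : (1:Nat) ≤ n.toNat := by omega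
    have hg : (2:Int) * (pvG n.toNat : Int) = n * (n - 1) := by
      have := pvTwo_pvG n.toNat
      have h' : ((2 * pvG n.toNat : Nat) : Int) = ((n.toNat * (n.toNat - 1) : Nat) : Int) := by
        exact_mod_cast congrArg (fun m : Nat => (m : Int)) this
      push_cast [hN1] at h'
      rw [hN] at h'
      linarith [h']
    have h2 : 3 * n * n * n * (n - 1) =
        (0 + (n.toNat : Int) * ((n.toNat : Int) * ((n.toNat : Int) * 0 + (pvG n.toNat : Int))
            + (n.toNat : Int) * (pvG n.toNat : Int))
          + (n.toNat : Int) * (n.toNat : Int) * (pvG n.toNat : Int)) * 2 := by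
      rw [hN]
      linear_combination (-(3) * n * n) * hg
    rw [PySem.Int.floordiv_eq_ediv_of_pos (by omega), h2]
    rw [Int.mul_ediv_cancel _ (by norm_num)]
  · rw [if_neg hpos]
    unfold pvLoopI
    rw [dif_neg (by omega)]
    simp [PySem.Int.floordiv]
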